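-- pv_equiv track=rewrite | github.com/QuangHaPTIT/PythonPTIT | BienVaKieuDuLieuDonGian/PY01028.py | check
-- ===== SOURCE A (Python) =====
-- def check(s):
--     hit = 0
--     for i in s:
--         if i != '6' and i != '8':
--             return False
--         if i == '8':
--             hit += 1
--         else: hit = 0
--         if hit == 3: return False
--     return True
-- ===== SOURCE B (Python) =====
-- def check(s):
--     return set(s) <= {'6', '8'} and '888' not in s
-- ===== Notes on version B (the rewrite author's own statement) =====
-- stated objective: idiomatic
-- what changed: Replaced the fused character-by-character scan with a run counter by two global built-in checks: a set-subset test for the alphabet and a substring search for '888'.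
import Mathlib
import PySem

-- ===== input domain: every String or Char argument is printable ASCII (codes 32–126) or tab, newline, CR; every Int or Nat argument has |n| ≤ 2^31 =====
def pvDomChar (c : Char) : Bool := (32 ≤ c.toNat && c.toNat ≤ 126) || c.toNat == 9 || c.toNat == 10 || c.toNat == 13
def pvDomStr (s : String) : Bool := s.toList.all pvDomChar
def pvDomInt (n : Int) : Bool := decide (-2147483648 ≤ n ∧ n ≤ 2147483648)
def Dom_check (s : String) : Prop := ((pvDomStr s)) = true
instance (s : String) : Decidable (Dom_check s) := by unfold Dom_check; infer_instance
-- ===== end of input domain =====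

-- B replaces A's fused per-character scan (run counter + early returns) by two global
-- built-in checks: alphabet subset of {'6','8'} and no '888' substring (idiomatic, same cost).

-- ===== PORT A =====
def checkLoop : List Char → Int → Bool
  | [], _ => true
  | i :: rest, hit =>
    if i ≠ '6' ∧ i ≠ '8' then false
    else
      let hit' : Int := if i = '8' then hit + 1 else 0
      if hit' = 3 then false else checkLoop rest hit'


def check (s : String) : Bool := checkLoop s.toList 0

-- ===== PORT B =====
def check_alt (s : String) : Bool :=
  PySem.Set.issubset (PySem.Set.ofList s.toList) (['6', '8'] : List Char)
    && !(PySem.Str.isIn "888" s)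

-- ===== PRECONDITION & SPEC =====
def Spec_check (s : String) (out : Bool) : Prop := out = check_alt s
instance (s : String) (out : Bool) : Decidable (Spec_check s out) := by unfold Spec_check; infer_instance

-- ===== CLAIM (what is proved, stated in full; the proofs are below) =====
def Claim_equal_check : Prop := ∀ (s : String), Dom_check s → Spec_check s (check s)

-- ===== LEMMAS AND PROOFS =====

-- Invariant of A's loop: with a trailing run of h eights already counted (h ≤ 2), the loop
-- accepts iff all chars are '6'/'8', the list does not start with 3-h eights, and no '888' occurs.
lemma checkLoop_eq (l : List Char) (h : Nat) (hh : h ≤ 2) :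
    checkLoop l (h : Int) =
      decide ((∀ c ∈ l, c = '6' ∨ c = '8') ∧
        ¬ (List.replicate (3 - h) '8' <+: l) ∧ ¬ (['8', '8', '8'] <:+: l)) := by
  induction l generalizing h with
  | nil =>
    have h3 : 3 - h ≠ 0 := by omega
    simp [checkLoop]
    omega
  | cons c rest ih =>
    have hrep : ∀ (k : Nat) (x : Char), (List.replicate (k+1) '8' <+: x :: rest) ↔ (x = '8' ∧ List.replicate k '8' <+: rest) := by
      intro k x
      simp [List.replicate, List.cons_prefix_cons, eq_comm]
    by_cases hc : c = '6' ∨ c = '8'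
    · rcases hc with hc | hc
      · subst hc
        have hstep : checkLoop ('6' :: rest) (h : Int) = checkLoop rest ((0 : Nat) : Int) := by
          simp [checkLoop]
        rw [hstep, ih 0 (by omega)]
        simp only [decide_eq_decide]
        have h3 : 3 - h = (2 - h) + 1 := by omega
        constructor
        · rintro ⟨hv, hp, hi⟩
          refine ⟨fun x hx => (List.mem_cons.mp hx).elim (fun h => Or.inl h) (hv x), ?_, ?_⟩
          · rw [h3, hrep]; rintro ⟨h68, -⟩; exact absurd h68 (by decide)
          · rw [List.infix_cons_iff]
            rintro (hpre | hinf)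
            · rw [show (['8','8','8'] : List Char) = List.replicate 3 '8' by rfl, hrep] at hpre
              exact absurd hpre.1 (by decide)
            · exact hi hinf
        · rintro ⟨hv, hp, hi⟩
          have hi' : ¬ (['8','8','8'] <:+: rest) := fun h' => hi (List.infix_cons_iff.mpr (Or.inr h'))
          exact ⟨fun x hx => hv x (List.mem_cons_of_mem _ hx),
            fun h' => hi' ((show (List.replicate 3 '8' : List Char) = ['8','8','8'] by rfl) ▸ h').isInfix, hi'⟩
      · subst hc
        by_cases h2 : h = 2
        · subst h2
          have hstep : checkLoop ('8' :: rest) ((2 : Nat) : Int) = false := by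
            simp [checkLoop]
          rw [hstep]
          symm
          simp only [decide_eq_false_iff_not]
          rintro ⟨-, hp, -⟩
          exact hp ((hrep 0 '8').mpr ⟨rfl, by simp⟩)
        · have hstep : checkLoop ('8' :: rest) (h : Int) = checkLoop rest ((h+1 : Nat) : Int) := by
            have : ((h : Int) + 1) ≠ 3 := by omega
            simp [checkLoop, this]
          rw [hstep, ih (h+1) (by omega)]
          simp only [decide_eq_decide]
          have h3 : 3 - h = (3 - (h+1)) + 1 := by omega
          constructor
          · rintro ⟨hv, hp, hi⟩
            refine ⟨fun x hx => (List.mem_cons.mp hx).elim (fun h => Or.inr h) (hv x), ?_, ?_⟩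
            · rw [h3, hrep]; rintro ⟨-, hpre⟩; exact hp hpre
            · rw [List.infix_cons_iff]
              rintro (hpre | hinf)
              · rw [show (['8','8','8'] : List Char) = List.replicate 3 '8' by rfl, hrep] at hpre
                refine hp ?_
                refine List.IsPrefix.trans ?_ hpre.2
                exact ⟨List.replicate (2 - (3 - (h+1))) '8', by
                  rw [← List.replicate_add]
                  congr 1
                  omega⟩
              · exact hi hinf
          · rintro ⟨hv, hp, hi⟩
            have hi' : ¬ (['8','8','8'] <:+: rest) := fun h' => hi (List.infix_cons_iff.mpr (Or.inr h'))
            refine ⟨fun x hx => hv x (List.mem_cons_of_mem _ hx), ?_, hi'⟩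
            intro hpre
            apply hp
            rw [h3]
            exact (hrep _ '8').mpr ⟨rfl, hpre⟩
    · rw [not_or] at hc
      have hstep : checkLoop (c :: rest) (h : Int) = false := by
        simp [checkLoop, hc.1, hc.2]
      rw [hstep]
      symm
      simp only [decide_eq_false_iff_not]
      rintro ⟨hv, -, -⟩
      rcases hv c (List.mem_cons_self) with h6 | h8
      · exact hc.1 h6
      · exact hc.2 h8


-- ===== VERDICT (by name: the statement is the Claim_ definition above) =====
theorem check_spec : Claim_equal_check := by
  intro s _
  unfold Spec_check check
  rw [show (0 : Int) = ((0 : Nat) : Int) from rfl, checkLoop_eq s.toList 0 (by omega)]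
  have hB : check_alt s = true ↔
      ((∀ c ∈ s.toList, c = '6' ∨ c = '8') ∧ ¬ (['8', '8', '8'] <:+: s.toList)) := by
    simp [check_alt, PySem.Set.issubset_iff, PySem.Set.mem_ofList, PySem.Chars.isIn_eq_false_iff,
      show ("888" : String).toList = ['8', '8', '8'] from rfl]
  rw [Bool.eq_iff_iff, decide_eq_true_iff, hB]
  constructor
  · rintro ⟨hv, -, hi⟩; exact ⟨hv, hi⟩
  · rintro ⟨hv, hi⟩
    exact ⟨hv, fun hpre => hi
      ((show (List.replicate 3 '8' : List Char) = ['8', '8', '8'] from rfl) ▸ hpre).isInfix, hi⟩
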